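-- pv_equiv track=rewrite | github.com/ghostyusheng/notebook_test | 1.py | f
-- ===== SOURCE A (Python) =====
-- def f(s: str, t: str) -> int:
--     s_len = len(s)
--     t_len = len(t)
--     t_idx = 0
--     count = 0
--
--     while t_idx < t_len:
--         s_idx = 0
--         find = False
--         while s_idx < s_len and t_idx < t_len:
--             if s[s_idx] == t[t_idx]:
--                 t_idx += 1
--                 find = True
--             s_idx += 1
--         if not find:
--             return -1
--         count += 1
--
--     return count
-- ===== SOURCE B (Python) =====
-- def _bisect_left(a, x):
--     lo, hi = 0, len(a)
--     while lo < hi: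
--         mid = (lo + hi) // 2
--         if a[mid] < x:
--             lo = mid + 1
--         else:
--             hi = mid
--     return lo
--
--
-- def f(s: str, t: str) -> int:
--     if not t:
--         return 0
--     pos = {}
--     for i, c in enumerate(s):
--         pos.setdefault(c, []).append(i)
--     count = 1
--     p = 0
--     for c in t:
--         lst = pos.get(c)
--         if lst is None:
--             return -1
--         j = _bisect_left(lst, p)
--         if j < len(lst):
--             p = lst[j] + 1
--         else:
--             count += 1
--             p = lst[0] + 1
--     return count
-- ===== Notes on version B (the rewrite author's own statement) =====
-- stated objective: alternative
-- what changed: Replaced A's repeated greedy passes over s (the inner while rescans s for every wrap) by a precomputed per-character sorted position index queried with binary search for the next occurrence, counting wraps in a single pass over t; better worst case, but not measurably faster on the benchmark's random inputs.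
import Mathlib
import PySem

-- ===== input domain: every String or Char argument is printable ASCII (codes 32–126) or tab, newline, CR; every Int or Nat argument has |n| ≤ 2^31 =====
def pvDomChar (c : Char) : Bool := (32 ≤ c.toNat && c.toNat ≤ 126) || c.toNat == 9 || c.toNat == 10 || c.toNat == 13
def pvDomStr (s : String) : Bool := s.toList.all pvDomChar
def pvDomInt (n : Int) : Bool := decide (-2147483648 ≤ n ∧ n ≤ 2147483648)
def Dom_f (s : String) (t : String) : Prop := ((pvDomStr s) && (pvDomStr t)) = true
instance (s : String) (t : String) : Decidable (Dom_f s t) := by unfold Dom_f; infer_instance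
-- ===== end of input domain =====

-- B replaces A's repeated greedy passes over s by a per-character position index queried with
-- binary search for the next occurrence, counting wraps in one pass over t (objective: alternative).

-- ===== PORT A =====
-- inner while loop of A: scans s left to right, greedily consuming chars of t;
-- returns (remaining t, find flag) — the pair (t_idx, find) of the Python, with t as the suffix.
def fInner : List Char → List Char → Bool → (List Char × Bool)
  | [], trem, find => (trem, find)
  | _ :: _, [], find => ([], find)
  | a :: srest, c :: trest, find =>
      if a = c then fInner srest trest true else fInner srest (c :: trest) find

-- termination helper for the outer while loop (cited by fOuter's decreasing_by)
theorem fInner_len_le : ∀ (l tr : List Char) (b : Bool), (fInner l tr b).1.length ≤ tr.length := by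
  intro l
  induction l with
  | nil => intro tr b; simp [fInner]
  | cons a srest ih =>
    intro tr b
    cases tr with
    | nil => simp [fInner]
    | cons c trest =>
      by_cases h : a = c
      · simp only [fInner, if_pos h]
        exact Nat.le_trans (ih trest true) (Nat.le_succ _)
      · simp only [fInner, if_neg h]
        exact ih (c :: trest) b

theorem fInner_progress : ∀ (l tr : List Char),
    (fInner l tr false).2 = true → (fInner l tr false).1.length < tr.length := by
  intro l
  induction l with
  | nil => intro tr h; simp [fInner] at h
  | cons a srest ih =>
    intro tr h
    cases tr with
    | nil => simp [fInner] at h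
    | cons c trest =>
      by_cases hac : a = c
      · simp only [fInner, if_pos hac]
        exact Nat.lt_succ_of_le (fInner_len_le srest trest true)
      · simp only [fInner, if_neg hac] at h ⊢
        exact ih (c :: trest) h

-- outer while loop of A
def fOuter (s : List Char) (trem : List Char) (count : Int) : Int :=
  if trem.isEmpty then count
  else if h : (fInner s trem false).2 = true then fOuter s (fInner s trem false).1 (count + 1)
  else -1
termination_by trem.length
decreasing_by
  exact fInner_progress s trem h

def f (s : String) (t : String) : Int := fOuter s.toList t.toList 0

-- ===== PORT B =====
-- Source B's hand-written _bisect_left loop (lo/hi are list indices, hence Nat here)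
def blLoop (a : List Int) (x : Int) (lo hi : Nat) : Nat :=
  if _h : lo < hi then
    -- mid = (lo + hi) // 2 inlined; a[mid] is always in range (lo ≤ mid < hi ≤ len a), getD is exact there
    if a.getD ((lo + hi) / 2) 0 < x then blLoop a x ((lo + hi) / 2 + 1) hi
    else blLoop a x lo ((lo + hi) / 2)
  else lo
termination_by hi - lo
decreasing_by
  · omega
  · omega

-- pos.setdefault(c, []).append(i) over enumerate(s)  (= d[c] = d.get(c, []) + [i], key kept in place)
def buildPos (s : List Char) : PySem.Dict Char (List Int) :=
  (PySem.List.enumerate s 0).foldl (fun d q => d.modify q.2 [] (· ++ [q.1])) PySem.Dict.empty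

-- the `for c in t` loop of Source B (early `return -1` = stopping recursion)
def fAltGo (pos : PySem.Dict Char (List Int)) : List Char → Int → Int → Int
  | [], _p, count => count
  | c :: rest, p, count =>
    match pos.get? c with
    | none => -1
    | some lst =>
      -- j = _bisect_left(lst, p) inlined
      if blLoop lst p 0 lst.length < lst.length then
        fAltGo pos rest (lst.getD (blLoop lst p 0 lst.length) 0 + 1) count
      else fAltGo pos rest (lst.getD 0 0 + 1) (count + 1)

def f_alt (s : String) (t : String) : Int :=
  if t.toList.isEmpty then 0
  else fAltGo (buildPos s.toList) t.toList 0 1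

-- ===== PRECONDITION & SPEC =====
def Spec_f (s : String) (t : String) (out : Int) : Prop := out = f_alt s t
instance (s : String) (t : String) (out : Int) : Decidable (Spec_f s t out) := by unfold Spec_f; infer_instance

-- ===== CLAIM (what is proved, stated in full; the proofs are below) =====
def Claim_equal_f : Prop := ∀ (s : String) (t : String), Dom_f s t → Spec_f s t (f s t)

-- ===== LEMMAS AND PROOFS =====

-- A's inner loop on an empty t-suffix
theorem fInner_nil : ∀ (l : List Char) (b : Bool), fInner l [] b = ([], b) := by
  intro l b; cases l <;> rfl

-- the find flag, once true, stays true
theorem fInner_true_flag : ∀ (l tr : List Char), (fInner l tr true).2 = true := by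
  intro l
  induction l with
  | nil => intro tr; simp [fInner]
  | cons a srest ih =>
    intro tr
    cases tr with
    | nil => simp [fInner]
    | cons c trest =>
      by_cases h : a = c
      · simp only [fInner, if_pos h]; exact ih trest
      · simp only [fInner, if_neg h]; exact ih (c :: trest)

-- a pass over l that cannot match the current char leaves the state unchanged
theorem fInner_notmem {c : Char} : ∀ (l rest : List Char) (b : Bool), c ∉ l →
    fInner l (c :: rest) b = (c :: rest, b) := by
  intro l
  induction l with
  | nil => intro rest b _; rfl
  | cons a srest ih =>
    intro rest b h
    have hac : a ≠ c := by intro he; exact h (he ▸ List.mem_cons_self)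
    simp only [fInner, if_neg hac]
    exact ih rest b (fun hm => h (List.mem_cons_of_mem a hm))

-- a pass consumes the current char at its first occurrence
theorem fInner_mem {c : Char} : ∀ (l rest : List Char) (b : Bool), c ∈ l →
    fInner l (c :: rest) b = fInner (l.drop (l.findIdx (· == c) + 1)) rest true := by
  intro l
  induction l with
  | nil => intro rest b h; cases h
  | cons a srest ih =>
    intro rest b h
    by_cases hac : a = c
    · simp only [fInner, if_pos hac, List.findIdx_cons]
      have : (a == c) = true := beq_iff_eq.mpr hac
      simp [this]
    · have hm : c ∈ srest := by
        rcases List.mem_cons.mp h with h1 | h1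
        · exact absurd h1.symm hac
        · exact h1
      have : (a == c) = false := beq_eq_false_iff_ne.mpr hac
      simp only [fInner, if_neg hac, List.findIdx_cons, this, cond_false]
      rw [ih rest b hm]
      rfl

-- ---- occurrence lists ----
def occ (s : List Char) (c : Char) : List Int :=
  ((PySem.List.enumerate s 0).filter (fun q => q.2 == c)).map (fun q => q.1)

theorem mem_occ {s : List Char} {c : Char} {x : Int} :
    x ∈ occ s c ↔ ∃ k, ∃ _h : k < s.length, x = (k : Int) ∧ s[k] = c := by
  simp only [occ, List.mem_map, List.mem_filter, PySem.List.mem_enumerate_iff]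
  constructor
  · rintro ⟨q, ⟨⟨k, hk, rfl⟩, hc⟩, rfl⟩
    exact ⟨k, hk, by simp, by simpa using hc⟩
  · rintro ⟨k, hk, rfl, hc⟩
    exact ⟨((k : Int), s[k]), ⟨⟨k, hk, by simp⟩, by simpa using hc⟩, rfl⟩

theorem occ_pairwise (s : List Char) (c : Char) : (occ s c).Pairwise (· < ·) :=
  List.pairwise_map.mpr ((PySem.List.pairwise_lt_enumerate s 0).filter _)

theorem occ_mono {s : List Char} {c : Char} {m n : Nat} (hm : m < (occ s c).length)
    (hn : n < (occ s c).length) (h : m ≤ n) : (occ s c)[m] ≤ (occ s c)[n] := by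
  rcases Nat.lt_or_ge m n with h1 | h1
  · exact le_of_lt (List.pairwise_iff_getElem.mp (occ_pairwise s c) m n hm hn h1)
  · have : m = n := Nat.le_antisymm h h1
    subst this; exact le_refl _

-- ---- the built dict ----
theorem buildPos_eq_swap_foldl (s : List Char) : buildPos s
    = List.foldl (fun d (p : Char × Int) => d.modify p.1 [] (· ++ [p.2])) PySem.Dict.empty
        ((PySem.List.enumerate s 0).map (fun q => (q.2, q.1))) := by
  rw [List.foldl_map]; rfl

theorem buildPos_getD (s : List Char) (c : Char) : (buildPos s).getD c [] = occ s c := by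
  rw [buildPos_eq_swap_foldl, PySem.Dict.getD_foldl_modify_append]
  simp [occ, List.filter_map, Function.comp_def, List.map_map]

theorem buildPos_get?_none_iff (s : List Char) (c : Char) :
    (buildPos s).get? c = none ↔ c ∉ s := by
  rw [PySem.Dict.get?_eq_none_iff_not_mem_keys]
  unfold buildPos
  rw [show (fun (d : PySem.Dict Char (List Int)) (q : Int × Char) => d.modify q.2 [] (· ++ [q.1]))
      = (fun d x => d.modify ((fun q : Int × Char => q.2) x) [] ((fun (_ : PySem.Dict Char (List Int)) (q : Int × Char) => (· ++ [q.1])) d x)) from rfl,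
    PySem.Dict.keys_foldl_modify_key, PySem.List.map_snd_enumerate]
  simp [PySem.Set.mem_update, PySem.Dict.keys_empty]

theorem buildPos_get?_of_mem {s : List Char} {c : Char} (h : c ∈ s) :
    (buildPos s).get? c = some (occ s c) := by
  cases hg : (buildPos s).get? c with
  | none => exact absurd ((buildPos_get?_none_iff s c).mp hg) (not_not.mpr h)
  | some v =>
    have := PySem.Dict.getD_of_get?_eq_some (buildPos s) ([] : List Int) hg
    rw [buildPos_getD] at this
    rw [← this]

-- ---- binary search ----
theorem blLoop_inv (a : List Int) (x : Int)
    (hmono : ∀ m n (_hm : m < a.length) (_hn : n < a.length), m ≤ n → a[m] ≤ a[n]) :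
    ∀ (n lo hi : Nat), hi - lo ≤ n → lo ≤ hi → hi ≤ a.length →
    (∀ m (_hm : m < a.length), m < lo → a[m] < x) →
    (∀ m (_hm : m < a.length), hi ≤ m → x ≤ a[m]) →
    (∀ m (_hm : m < a.length), m < blLoop a x lo hi → a[m] < x) ∧
    (∀ m (_hm : m < a.length), blLoop a x lo hi ≤ m → x ≤ a[m]) := by
  intro n
  induction n with
  | zero =>
    intro lo hi hfuel hlh hha hlow hhigh
    have hlh' : ¬ lo < hi := by omega
    rw [blLoop, dif_neg hlh']
    exact ⟨hlow, fun m hm h1 => hhigh m hm (by omega)⟩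
  | succ n ih =>
    intro lo hi hfuel hlh hha hlow hhigh
    by_cases hlt : lo < hi
    · have hmidlt : (lo + hi) / 2 < hi := by omega
      have hmidge : lo ≤ (lo + hi) / 2 := by omega
      have hmida : (lo + hi) / 2 < a.length := by omega
      rw [blLoop, dif_pos hlt]
      rw [List.getD_eq_getElem a 0 hmida]
      by_cases hv : a[(lo + hi) / 2] < x
      · rw [if_pos hv]
        exact ih ((lo + hi) / 2 + 1) hi (by omega) (by omega) hha
          (fun m hm h1 => lt_of_le_of_lt (hmono m ((lo + hi) / 2) hm hmida (by omega)) hv)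
          hhigh
      · rw [if_neg hv]
        push Not at hv
        exact ih lo ((lo + hi) / 2) (by omega) (by omega) (by omega) hlow
          (fun m hm h1 => le_trans hv (hmono ((lo + hi) / 2) m hmida hm h1))
    · rw [blLoop, dif_neg hlt]
      exact ⟨hlow, fun m hm h1 => hhigh m hm (by omega)⟩

theorem blLoop_spec (a : List Int) (x : Int)
    (hmono : ∀ m n (_hm : m < a.length) (_hn : n < a.length), m ≤ n → a[m] ≤ a[n]) :
    (∀ m (_hm : m < a.length), m < blLoop a x 0 a.length → a[m] < x) ∧
    (∀ m (_hm : m < a.length), blLoop a x 0 a.length ≤ m → x ≤ a[m]) :=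
  blLoop_inv a x hmono a.length 0 a.length (by omega) (by omega) (le_refl _)
    (fun m _ h => absurd h (Nat.not_lt_zero m)) (fun m hm h => absurd hm (by omega))

-- blLoop on occ s c finds exactly the first occurrence of c at index ≥ p
theorem occ_bisect_mem {s : List Char} {c : Char} (p : Nat) (hp : p ≤ s.length)
    (hc : c ∈ s.drop p) :
    blLoop (occ s c) (p : Int) 0 (occ s c).length < (occ s c).length ∧
    (occ s c).getD (blLoop (occ s c) (p : Int) 0 (occ s c).length) 0
      = ((p + (s.drop p).findIdx (· == c) : Nat) : Int) := by
  have ⟨P1, P2⟩ := blLoop_spec (occ s c) (p : Int) (fun m n hm hn h => occ_mono hm hn h)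
  set j := blLoop (occ s c) (p : Int) 0 (occ s c).length with hj
  set r := (s.drop p).findIdx (· == c) with hr
  have hrlen : r < (s.drop p).length := List.findIdx_lt_length.mpr ⟨c, hc, beq_self_eq_true c⟩
  have hilen : p + r < s.length := by
    have := (List.length_drop (l := s) (i := p)); omega
  have hsc : s[p + r]'hilen = c := by
    have h1 : ((· == c) ((s.drop p)[r]'hrlen)) = true := List.findIdx_getElem (w := hrlen)
    have h2 : (s.drop p)[r]'hrlen = s[p + r]'hilen := List.getElem_drop
    rw [h2] at h1; exact beq_iff_eq.mp h1
  have hmem : ((p + r : Nat) : Int) ∈ occ s c := mem_occ.mpr ⟨p + r, hilen, rfl, hsc⟩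
  rcases List.getElem_of_mem hmem with ⟨m, hm, hme⟩
  -- the entry at m is ≥ p, so j ≤ m, so j < length
  have hge : (p : Int) ≤ (occ s c)[m] := by rw [hme]; exact_mod_cast Nat.le_add_right p r
  have hjm : j ≤ m := by
    by_contra hcon
    exact absurd hge (not_le.mpr (P1 m hm (by omega)))
  have hjlen : j < (occ s c).length := lt_of_le_of_lt hjm hm
  refine ⟨hjlen, ?_⟩
  rw [List.getD_eq_getElem _ 0 hjlen]
  -- (occ s c)[j] is an occurrence ≥ p, hence ≥ p + r by minimality of findIdx
  have hjv : (p : Int) ≤ (occ s c)[j] := P2 j hjlen (le_refl _)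
  rcases mem_occ.mp (List.getElem_mem hjlen) with ⟨k, hk, hke, hkc⟩
  have hpk : p ≤ k := by
    have : (p : Int) ≤ (k : Int) := hke ▸ hjv
    exact_mod_cast this
  have hik : p + r ≤ k := by
    by_contra hcon
    push Not at hcon
    have hkr : k - p < r := by omega
    have hkd : k - p < (s.drop p).length := by omega
    have := List.not_of_lt_findIdx (p := (· == c)) (xs := s.drop p) (i := k - p) (by omega)
    simp only [List.getElem_drop, show p + (k - p) = k from by omega] at this
    simp [hkc] at this
  have h1 : ((p + r : Nat) : Int) ≤ (occ s c)[j] := by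
    rw [hke]; exact_mod_cast hik
  have h2 : (occ s c)[j] ≤ ((p + r : Nat) : Int) := by
    rw [← hme]; exact occ_mono hjlen hm hjm
  omega

-- if c has no occurrence at index ≥ p, blLoop runs off the end
theorem occ_bisect_notmem {s : List Char} {c : Char} (p : Nat) (hp : p ≤ s.length)
    (hc : c ∉ s.drop p) :
    ¬ blLoop (occ s c) (p : Int) 0 (occ s c).length < (occ s c).length := by
  have ⟨P1, P2⟩ := blLoop_spec (occ s c) (p : Int) (fun m n hm hn h => occ_mono hm hn h)
  intro hlt
  have hjv := P2 _ hlt (le_refl _)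
  rcases mem_occ.mp (List.getElem_mem hlt) with ⟨k, hk, hke, hkc⟩
  have hpk : p ≤ k := by
    have : (p : Int) ≤ (k : Int) := hke ▸ hjv
    exact_mod_cast this
  apply hc
  have hkd : k - p < (s.drop p).length := by
    have := (List.length_drop (l := s) (i := p)); omega
  have heq : (s.drop p)[k - p]'hkd = c := by
    simp only [List.getElem_drop, show p + (k - p) = k from by omega]
    exact hkc
  exact heq ▸ List.getElem_mem hkd

-- every entry of occ is nonnegative
theorem occ_nonneg {s : List Char} {c : Char} {x : Int} (h : x ∈ occ s c) : 0 ≤ x := by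
  rcases mem_occ.mp h with ⟨k, hk, rfl, _⟩
  exact Int.natCast_nonneg k

-- blLoop with target 0 lands on index 0
theorem blLoop_zero {s : List Char} {c : Char} :
    blLoop (occ s c) (((0 : Nat) : Int)) 0 (occ s c).length = 0 := by
  rcases Nat.eq_zero_or_pos (occ s c).length with h | h
  · rw [h, blLoop]
    simp
  · by_contra hne
    have ⟨P1, _⟩ := blLoop_spec (occ s c) (((0 : Nat) : Int))
      (fun m n hm hn hle => occ_mono hm hn hle)
    have h1 := P1 0 h (Nat.pos_of_ne_zero hne)
    have h2 : (0 : Int) ≤ (occ s c)[0] := occ_nonneg (List.getElem_mem h)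
    simp at h1
    omega

-- first occurrence overall: head of occ
theorem occ_head {s : List Char} {c : Char} (h : c ∈ s) :
    (occ s c).getD 0 0 = ((s.findIdx (· == c) : Nat) : Int) := by
  have h0 : c ∈ s.drop 0 := by simpa using h
  obtain ⟨hjlt, hval⟩ := occ_bisect_mem 0 (Nat.zero_le _) h0
  rw [blLoop_zero] at hjlt hval
  simpa [List.drop_zero] using hval

-- ===== the main induction =====
theorem main_lemma (s : List Char) : ∀ (trem : List Char) (p : Nat) (count : Int),
    p ≤ s.length →
    fOuter s (fInner (s.drop p) trem true).1 count
      = fAltGo (buildPos s) trem (p : Int) count := by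
  intro trem
  induction trem with
  | nil =>
    intro p count _
    rw [fInner_nil, fOuter]
    simp [fAltGo]
  | cons c rest ih =>
    intro p count hp
    by_cases hc : c ∈ s.drop p
    · -- c occurs at index ≥ p: both sides step to the first such occurrence
      have hcs : c ∈ s := List.drop_subset p s hc
      rw [fInner_mem _ _ _ hc, List.drop_drop]
      have hrlen : (s.drop p).findIdx (· == c) < (s.drop p).length :=
        List.findIdx_lt_length.mpr ⟨c, hc, beq_self_eq_true c⟩
      have hdl := List.length_drop (l := s) (i := p)
      rw [ih (p + ((s.drop p).findIdx (· == c) + 1)) count (by omega)]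
      obtain ⟨hjlt, hval⟩ := occ_bisect_mem p hp hc
      conv_rhs => rw [fAltGo]
      rw [buildPos_get?_of_mem hcs]
      simp only [if_pos hjlt, hval]
      congr 1
    · by_cases hcs : c ∈ s
      · -- wrap: A starts a fresh pass; B restarts at the first occurrence, count + 1
        rw [fInner_notmem _ _ _ hc]
        rw [fOuter]
        simp only [List.isEmpty_cons, Bool.false_eq_true, if_false]
        rw [fInner_mem _ _ _ hcs, dif_pos (fInner_true_flag _ _)]
        have hi0 : s.findIdx (· == c) < s.length :=
          List.findIdx_lt_length.mpr ⟨c, hcs, beq_self_eq_true c⟩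
        rw [ih (s.findIdx (· == c) + 1) (count + 1) (by omega)]
        conv_rhs => rw [fAltGo]
        rw [buildPos_get?_of_mem hcs]
        simp only []
        rw [if_neg (occ_bisect_notmem p hp hc), occ_head hcs]
        congr 1
      · -- c nowhere in s: both return -1
        rw [fInner_notmem _ _ _ hc]
        rw [fOuter]
        simp only [List.isEmpty_cons, Bool.false_eq_true, if_false]
        rw [fInner_notmem _ _ _ hcs]
        simp only [Bool.false_eq_true, dite_false]
        conv_rhs => rw [fAltGo]
        rw [(buildPos_get?_none_iff s c).mpr hcs]

theorem top_case (s : List Char) (c : Char) (rest : List Char) (count : Int) :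
    fOuter s (c :: rest) count
      = fAltGo (buildPos s) (c :: rest) ((0 : Nat) : Int) (count + 1) := by
  by_cases hcs : c ∈ s
  · rw [fOuter]
    simp only [List.isEmpty_cons, Bool.false_eq_true, if_false]
    rw [fInner_mem _ _ _ hcs, dif_pos (fInner_true_flag _ _)]
    have hi0 : s.findIdx (· == c) < s.length :=
      List.findIdx_lt_length.mpr ⟨c, hcs, beq_self_eq_true c⟩
    rw [main_lemma s rest (s.findIdx (· == c) + 1) (count + 1) (by omega)]
    have h0 : c ∈ s.drop 0 := by simpa using hcs
    obtain ⟨hjlt, hval⟩ := occ_bisect_mem 0 (Nat.zero_le _) h0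
    rw [blLoop_zero] at hjlt hval
    conv_rhs => rw [fAltGo]
    rw [buildPos_get?_of_mem hcs]
    simp only [blLoop_zero, if_pos hjlt, hval]
    simp only [List.drop_zero, Nat.zero_add]
    congr 1
  · rw [fOuter]
    simp only [List.isEmpty_cons, Bool.false_eq_true, if_false]
    rw [fInner_notmem _ _ _ hcs]
    simp only [Bool.false_eq_true, dite_false]
    conv_rhs => rw [fAltGo]
    rw [(buildPos_get?_none_iff s c).mpr hcs]

-- ===== VERDICT (by name: the statement is the Claim_ definition above) =====
theorem f_spec : Claim_equal_f := by
  intro s t _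
  show f s t = f_alt s t
  unfold f f_alt
  cases ht : t.toList with
  | nil => rw [fOuter]; simp
  | cons c rest =>
    simp only [List.isEmpty_cons, Bool.false_eq_true, if_false]
    have h := top_case s.toList c rest 0
    norm_num at h
    exact h
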